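-- pv_equiv track=rewrite | github.com/web3firm/hyperbot | setup_telegram.py | update_env_var
-- ===== SOURCE A (Python) =====
-- def update_env_var(content, var_name, var_value):
--     """Update or add environment variable"""
--     lines = content.split('\n')
--     updated = False
--
--     for i, line in enumerate(lines):
--         if line.startswith(f"{var_name}="):
--             lines[i] = f"{var_name}={var_value}"
--             updated = True
--             break
--
--     if not updated:
--         lines.append(f"{var_name}={var_value}")
--
--     return '\n'.join(lines)
-- ===== SOURCE B (Python) =====
-- def update_env_var(content, var_name, var_value):
--     """Update or add environment variable"""
--     entry = f"{var_name}={var_value}"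
--     head, sep, tail = ('\n' + content).partition('\n' + var_name + '=')
--     if not sep:
--         return content + '\n' + entry
--     _, nl, rest = tail.partition('\n')
--     return (head + '\n' + entry + nl + rest)[1:]
-- ===== Notes on version B (the rewrite author's own statement) =====
-- stated objective: alternative
-- what changed: B never splits the content into a line list: it works on the flat string, locating the variable with str.partition on the pattern '\n'+name+'=' applied to '\n'+content, splicing the new entry up to the next newline, and appending content+'\n'+entry when partition finds nothing.
-- outside the precondition, e.g. on update_env_var('a\nb=1', 'a\nb', '2'): A returns 'a\nb=1\na\nb=2', B returns 'a\nb=2'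
import Mathlib
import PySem

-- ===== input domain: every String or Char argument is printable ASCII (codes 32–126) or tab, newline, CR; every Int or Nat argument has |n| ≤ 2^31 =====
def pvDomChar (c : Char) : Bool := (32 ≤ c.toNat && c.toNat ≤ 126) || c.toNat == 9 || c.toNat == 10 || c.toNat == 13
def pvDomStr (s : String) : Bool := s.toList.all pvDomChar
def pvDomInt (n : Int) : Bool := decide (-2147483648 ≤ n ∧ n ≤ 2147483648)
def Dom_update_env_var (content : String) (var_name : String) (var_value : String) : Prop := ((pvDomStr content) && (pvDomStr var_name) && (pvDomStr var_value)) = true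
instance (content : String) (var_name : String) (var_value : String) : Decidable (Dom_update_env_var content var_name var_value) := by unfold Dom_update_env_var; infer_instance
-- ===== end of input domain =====

-- B abandons A's split-into-lines scan: it edits the flat string via str.partition on
-- '\n'+name+'=' (alternative algorithm, same cost).

-- ===== PORT A =====
-- A's for-loop with enumerate/assignment/break: returns the updated line list on a match, none otherwise
def pvLoopA (pref entry : List Char) : List (List Char) → Option (List (List Char))
  | [] => none
  | l :: ls =>
      if PySem.Chars.startswith l pref then some (entry :: ls)
      else match pvLoopA pref entry ls with
           | none => none
           | some r => some (l :: r)

def update_env_var (content : String) (var_name : String) (var_value : String) : String :=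
  let pref := var_name.toList ++ ['=']
  let entry := var_name.toList ++ '=' :: var_value.toList
  let lines := PySem.Chars.splitOn content.toList ['\n']
  let lines' := match pvLoopA pref entry lines with
                | some r => r
                | none => lines ++ [entry]
  String.ofList (PySem.Chars.join ['\n'] lines')

-- ===== PORT B =====
-- str.partition(pat), ported by hand via Chars.find: exact for nonempty pat (Python's
-- partition raises only on an empty separator; both separators below are nonempty)
def pvPartition (s pat : List Char) : List Char × List Char × List Char :=
  let i := PySem.Chars.find s pat
  if i = -1 then (s, [], [])
  else (s.take i.toNat, pat, s.drop (i.toNat + pat.length))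

def update_env_var_alt (content : String) (var_name : String) (var_value : String) : String :=
  let entry := var_name.toList ++ '=' :: var_value.toList
  match pvPartition ('\n' :: content.toList) ('\n' :: (var_name.toList ++ ['='])) with
  | (head, sep, tail) =>
    if sep = [] then String.ofList (content.toList ++ '\n' :: entry)
    else
      match pvPartition tail ['\n'] with
      | (_, nl, rest) => String.ofList (PySem.List.slice (head ++ '\n' :: entry ++ nl ++ rest) (some 1) none)

-- ===== PRECONDITION & SPEC =====
-- Pre_ excludes inputs whose var_name contains a newline AND where '\n'+var_name+'=' occurs in
-- '\n'+content: such a multi-line "name" cannot denote a line-formatted env var, and there A's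
-- per-line scan (which can never match it, so appends) and B's flat search (which matches it
-- across a line break) make different, equally accidental choices.
def Pre_update_env_var (content : String) (var_name : String) (var_value : String) : Prop :=
  '\n' ∉ var_name.toList ∨
    ¬ PySem.Chars.isIn ('\n' :: var_name.toList ++ ['=']) ('\n' :: content.toList) = true
instance (content : String) (var_name : String) (var_value : String) : Decidable (Pre_update_env_var content var_name var_value) := by unfold Pre_update_env_var; infer_instance

def pvWitness_update_env_var : String × String × String := ("A=1\nB=2", "B", "3")

def Spec_update_env_var (content : String) (var_name : String) (var_value : String) (out : String) : Prop := out = update_env_var_alt content var_name var_value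
instance (content : String) (var_name : String) (var_value : String) (out : String) : Decidable (Spec_update_env_var content var_name var_value out) := by unfold Spec_update_env_var; infer_instance

-- ===== CLAIM (what is proved, stated in full; the proofs are below) =====
def Claim_equal_update_env_var : Prop := ∀ (content : String) (var_name : String) (var_value : String), Dom_update_env_var content var_name var_value → Pre_update_env_var content var_name var_value → Spec_update_env_var content var_name var_value (update_env_var content var_name var_value)

-- ===== LEMMAS AND PROOFS =====

-- structural version of content.split('\n')
def pvSplit : List Char → List (List Char)
  | [] => [[]]
  | c :: t =>
      if c = '\n' then [] :: pvSplit t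
      else match pvSplit t with
           | [] => [[c]]
           | x :: xs => (c :: x) :: xs

-- '\n' + '\n'.join(lines) in flat form
def pvFlat (lines : List (List Char)) : List Char := lines.flatMap (fun l => '\n' :: l)

theorem pvSplit_ne_nil (cs : List Char) : pvSplit cs ≠ [] := by
  induction cs with
  | nil => simp [pvSplit]
  | cons c t ih =>
      by_cases h : c = '\n' <;> simp [pvSplit, h]
      cases hq : pvSplit t <;> simp

theorem pvSplit_no_newline (cs : List Char) : ∀ l ∈ pvSplit cs, '\n' ∉ l := by
  induction cs with
  | nil => simp [pvSplit]
  | cons c t ih =>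
      by_cases h : c = '\n'
      · simpa [pvSplit, h] using ih
      · simp only [pvSplit, h, ite_false]
        cases hq : pvSplit t with
        | nil => simpa using fun hc => h hc.symm
        | cons x xs =>
            intro l hl
            rcases List.mem_cons.mp hl with rfl | hl
            · have hx : '\n' ∉ x := ih x (by simp [hq])
              simpa [hx] using fun hc => h hc.symm
            · exact ih l (by simp [hq, hl])

theorem pvFlat_pvSplit (cs : List Char) : pvFlat (pvSplit cs) = '\n' :: cs := by
  induction cs with
  | nil => simp [pvSplit, pvFlat]
  | cons c t ih =>
      by_cases h : c = '\n'
      · simp [pvSplit, h, pvFlat] at *; simpa [h] using ih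
      · simp only [pvSplit, h, ite_false]
        cases hq : pvSplit t with
        | nil => exact absurd hq (pvSplit_ne_nil t)
        | cons x xs =>
            simp [pvFlat, hq] at ih ⊢
            exact ih

theorem pvFlat_join (lines : List (List Char)) (h : lines ≠ []) :
    '\n' :: PySem.Chars.join ['\n'] lines = pvFlat lines := by
  induction lines with
  | nil => exact absurd rfl h
  | cons x xs ih =>
      cases xs with
      | nil => simp [PySem.Chars.join_singleton, pvFlat]
      | cons y ys =>
          rw [PySem.Chars.join_cons_cons]
          have h2 := ih (by simp)
          simp only [pvFlat, List.flatMap_cons] at h2 ⊢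
          rw [← h2]
          simp

theorem splitOn_go_eq (fuel : Nat) : ∀ (l cur : List Char) (acc : List (List Char)),
    l.length < fuel →
    PySem.Chars.splitOn.go ['\n'] fuel l cur acc =
      acc.reverse ++ (match pvSplit l with
                      | [] => [cur.reverse]
                      | x :: xs => (cur.reverse ++ x) :: xs) := by
  induction fuel with
  | zero => intro l cur acc h; omega
  | succ n ih =>
      intro l cur acc h
      cases l with
      | nil => simp [PySem.Chars.splitOn.go, pvSplit]
      | cons c rest =>
          by_cases hc : c = '\n'
          · subst hc
            rw [show PySem.Chars.splitOn.go ['\n'] (n+1) ('\n'::rest) cur acc =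
                  PySem.Chars.splitOn.go ['\n'] n (List.drop 1 ('\n'::rest)) [] (cur.reverse :: acc) by
                  simp [PySem.Chars.splitOn.go]]
            simp only [List.drop_one, List.tail_cons]
            rw [ih rest [] (cur.reverse :: acc) (by simpa using Nat.lt_of_succ_lt_succ h)]
            simp only [pvSplit, if_pos]
            cases hq : pvSplit rest with
            | nil => exact absurd hq (pvSplit_ne_nil rest)
            | cons x xs => simp
          · rw [show PySem.Chars.splitOn.go ['\n'] (n+1) (c::rest) cur acc =
                  PySem.Chars.splitOn.go ['\n'] n rest (c :: cur) acc by
                  simp [PySem.Chars.splitOn.go, List.isPrefixOf, Ne.symm hc]]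
            rw [ih rest (c :: cur) acc (by simpa using Nat.lt_of_succ_lt_succ h)]
            simp only [pvSplit, hc, ite_false]
            cases hq : pvSplit rest with
            | nil => simp
            | cons x xs => simp

theorem splitOn_eq_pvSplit (cs : List Char) :
    PySem.Chars.splitOn cs ['\n'] = pvSplit cs := by
  have := splitOn_go_eq (cs.length + 1) cs [] [] (by omega)
  rw [show PySem.Chars.splitOn cs ['\n'] = PySem.Chars.splitOn.go ['\n'] (cs.length + 1) cs [] [] by rfl]
  rw [this]
  cases hq : pvSplit cs with
  | nil => exact absurd hq (pvSplit_ne_nil cs)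
  | cons x xs => simp

theorem go_nil (sub : List Char) (k : Nat) :
    PySem.Chars.find.go sub [] k = if sub.isEmpty then (k : Int) else -1 := by
  simp [PySem.Chars.find.go]

theorem go_cons (sub : List Char) (h : Char) (t : List Char) (k : Nat) :
    PySem.Chars.find.go sub (h :: t) k =
      if sub.isPrefixOf (h :: t) then (k : Int) else PySem.Chars.find.go sub t (k+1) := by
  simp [PySem.Chars.find.go]

theorem find_nonneg_go (sub : List Char) (hs : sub ≠ []) :
    ∀ (s : List Char) (k : Nat), PySem.Chars.find.go sub s k = -1 ∨ (k : Int) ≤ PySem.Chars.find.go sub s k := by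
  intro s
  induction s with
  | nil => intro k; left; simp [go_nil, List.isEmpty_iff, hs]
  | cons h t ih =>
      intro k
      by_cases hp : sub.isPrefixOf (h :: t)
      · right; simp [go_cons, hp]
      · rw [go_cons, if_neg hp]
        rcases ih (k+1) with h1 | h1
        · left; exact h1
        · right; omega

theorem find_go_shift (sub : List Char) (hs : sub ≠ []) :
    ∀ (s : List Char) (k : Nat),
      PySem.Chars.find.go sub s k =
        if PySem.Chars.find.go sub s 0 = -1 then -1 else PySem.Chars.find.go sub s 0 + k := by
  intro s
  induction s with
  | nil => intro k; simp [go_nil, List.isEmpty_iff, hs]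
  | cons h t ih =>
      intro k
      by_cases hp : sub.isPrefixOf (h :: t)
      · simp [go_cons, hp]
      · rw [go_cons, go_cons, if_neg hp, if_neg hp, ih (k+1), ih 1]
        by_cases hz : PySem.Chars.find.go sub t 0 = -1
        · simp [hz]
        · have h0 : (0:Int) ≤ PySem.Chars.find.go sub t 0 := by
            rcases find_nonneg_go sub hs t 0 with h1 | h1
            · exact absurd h1 hz
            · exact h1
          simp only [hz, if_false]
          rw [if_neg (by push_cast; omega)]
          push_cast
          omega


theorem find_nl_none (u : List Char) (hu : '\n' ∉ u) :
    PySem.Chars.find u ['\n'] = -1 := by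
  have : ∀ k, PySem.Chars.find.go ['\n'] u k = -1 := by
    induction u with
    | nil => intro k; simp [go_nil]
    | cons c t ih =>
        intro k
        have hc : c ≠ '\n' := fun h => hu (h ▸ List.mem_cons_self)
        rw [go_cons, if_neg (by simp [List.isPrefixOf, Ne.symm hc]),
            ih (fun h => hu (List.mem_cons_of_mem _ h)) (k+1)]
  simpa [PySem.Chars.find] using this 0

theorem find_nl (u w : List Char) (hu : '\n' ∉ u) :
    PySem.Chars.find (u ++ '\n' :: w) ['\n'] = (u.length : Int) := by
  have : ∀ (u : List Char) (k : Nat), '\n' ∉ u →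
      PySem.Chars.find.go ['\n'] (u ++ '\n' :: w) k = (k + u.length : Int) := by
    intro u
    induction u with
    | nil => intro k _; rw [List.nil_append, go_cons, if_pos (by simp [List.isPrefixOf])]; simp
    | cons c t ih =>
        intro k hcu
        have hc : c ≠ '\n' := fun h => hcu (h ▸ List.mem_cons_self)
        rw [List.cons_append, go_cons, if_neg (by simp [List.isPrefixOf, Ne.symm hc]),
            ih (k+1) (fun h => hcu (List.mem_cons_of_mem _ h))]
        simp only [List.length_cons]; push_cast; omega
  simpa [PySem.Chars.find] using this u 0 hu

theorem find_walk (pref : List Char) : ∀ (l0 : List Char) (s' : List Char) (k : Nat),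
    '\n' ∉ l0 →
    PySem.Chars.find.go ('\n' :: pref) (l0 ++ s') k =
      PySem.Chars.find.go ('\n' :: pref) s' (k + l0.length) := by
  intro l0
  induction l0 with
  | nil => intro s' k _; simp
  | cons c t ih =>
      intro s' k hcu
      have hc : c ≠ '\n' := fun h => hcu (h ▸ List.mem_cons_self)
      rw [List.cons_append, go_cons, if_neg (by simp [List.isPrefixOf, Ne.symm hc]),
          ih s' (k+1) (fun h => hcu (List.mem_cons_of_mem _ h))]
      congr 1
      simp; omega

theorem prefix_of_flat (pref l0 s' : List Char) (hp : '\n' ∉ pref)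
    (hs : s' = [] ∨ ∃ w, s' = '\n' :: w) (h : pref <+: l0 ++ s') : pref <+: l0 := by
  rcases (List.prefix_or_prefix_of_prefix h (List.prefix_append l0 s')) with h1 | h1
  · exact h1
  · rcases h1 with ⟨p2, rfl⟩
    have hp2 : p2 <+: s' := (List.prefix_append_right_inj l0).mp h
    rcases hs with rfl | ⟨w, rfl⟩
    · rw [List.prefix_nil.mp hp2, List.append_nil]
    · cases p2 with
      | nil => simp
      | cons d q =>
          have hd : d = '\n' := by
            rcases hp2 with ⟨t2, ht⟩
            rw [List.cons_append] at ht
            exact (List.cons.injEq _ _ _ _ ▸ ht).1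
          exact absurd (hd ▸ (List.mem_append.mpr (Or.inr List.mem_cons_self))) hp

theorem find_shift (pref l0 s' : List Char) (hp : '\n' ∉ pref) (hl : '\n' ∉ l0)
    (hs : s' = [] ∨ ∃ w, s' = '\n' :: w) (hnp : ¬ pref <+: l0) :
    PySem.Chars.find ('\n' :: l0 ++ s') ('\n' :: pref) =
      if PySem.Chars.find s' ('\n' :: pref) = -1 then -1
      else (l0.length + 1 : Int) + PySem.Chars.find s' ('\n' :: pref) := by
  have hne : ('\n' :: pref) ≠ [] := by simp
  have h1 : ¬ ('\n' :: pref).isPrefixOf ('\n' :: (l0 ++ s')) := by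
    simp only [List.isPrefixOf_iff_prefix]
    intro h2
    exact hnp (prefix_of_flat pref l0 s' hp hs (List.cons_prefix_cons.mp h2).2)
  show PySem.Chars.find.go ('\n' :: pref) ('\n' :: (l0 ++ s')) 0 = _
  rw [go_cons, if_neg h1, find_walk pref l0 s' 1 hl, find_go_shift _ hne s' (1 + l0.length)]
  show _ = if PySem.Chars.find.go ('\n' :: pref) s' 0 = -1 then -1 else _
  by_cases hz : PySem.Chars.find.go ('\n' :: pref) s' 0 = -1
  · simp [hz]
  · rw [if_neg hz, if_neg hz]
    simp only [PySem.Chars.find]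
    push_cast
    ring

-- the core of B as an Option-valued function of the flat string
def pvCore (pref entry s : List Char) : Option (List Char) :=
  let pat := '\n' :: pref
  let i := PySem.Chars.find s pat
  if i = -1 then none
  else
    let tail := s.drop (i.toNat + pat.length)
    let j := PySem.Chars.find tail ['\n']
    some (s.take i.toNat ++ '\n' :: entry ++
          (if j = -1 then [] else '\n' :: tail.drop (j.toNat + 1)))

theorem pvCore_flat (pref entry : List Char) (hp : '\n' ∉ pref) :
    ∀ lines : List (List Char), (∀ l ∈ lines, '\n' ∉ l) →
      pvCore pref entry (pvFlat lines) = Option.map pvFlat (pvLoopA pref entry lines) := by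
  intro lines
  induction lines with
  | nil =>
      intro _
      have hf : PySem.Chars.find ([] : List Char) ('\n' :: pref) = -1 := by
        simp [PySem.Chars.find, go_nil]
      simp [pvFlat, pvCore, pvLoopA, hf]
  | cons l0 rest ih =>
      intro hno
      have hl : '\n' ∉ l0 := hno l0 List.mem_cons_self
      have hrest : ∀ l ∈ rest, '\n' ∉ l := fun l h => hno l (List.mem_cons_of_mem _ h)
      have hflat : pvFlat (l0 :: rest) = '\n' :: (l0 ++ pvFlat rest) := by
        simp [pvFlat]
      by_cases hs : PySem.Chars.startswith l0 pref
      · -- l0 matches: find is 0, entry replaces l0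
        have hpl : pref <+: l0 := List.isPrefixOf_iff_prefix.mp hs
        have hlen : pref.length ≤ l0.length := hpl.length_le
        have hfind : PySem.Chars.find ('\n' :: (l0 ++ pvFlat rest)) ('\n' :: pref) = 0 := by
          show PySem.Chars.find.go _ _ 0 = 0
          rw [go_cons, if_pos]
          · simp
          · simp only [List.isPrefixOf_iff_prefix, List.cons_prefix_cons]
            exact ⟨trivial, hpl.trans (l0.prefix_append _)⟩
        have hdrop : List.drop ((0:Int).toNat + ('\n' :: pref).length) ('\n' :: (l0 ++ pvFlat rest)) =
            l0.drop pref.length ++ pvFlat rest := by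
          simp [List.drop_append_of_le_length, hlen]
        have hu : '\n' ∉ l0.drop pref.length := fun h => hl (List.mem_of_mem_drop h)
        rw [hflat]
        simp only [pvCore, hfind]
        rw [if_neg (by omega), hdrop]
        have hloop : pvLoopA pref entry (l0 :: rest) = some (entry :: rest) := by
          simp [pvLoopA, hs]
        rw [hloop]
        cases rest with
        | nil =>
            simp only [pvFlat, List.flatMap_nil, List.append_nil]
            rw [find_nl_none _ hu]
            simp [pvFlat]
        | cons r rs =>
            rw [show pvFlat (r :: rs) = '\n' :: (r ++ pvFlat rs) by simp [pvFlat],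
                find_nl _ _ hu]
            rw [if_neg (by omega)]
            show some _ = some (pvFlat (entry :: r :: rs))
            simp only [Option.some.injEq, pvFlat, List.flatMap_cons, Int.toNat_natCast]
            rw [List.drop_length_add_append, List.drop_succ_cons, List.drop_zero]
            simp
      · -- l0 does not match: shift past it
        have hnp : ¬ pref <+: l0 := fun h => hs (List.isPrefixOf_iff_prefix.mpr h)
        have hshape : pvFlat rest = [] ∨ ∃ w, pvFlat rest = '\n' :: w := by
          cases rest with
          | nil => exact Or.inl rfl
          | cons r rs => exact Or.inr ⟨r ++ pvFlat rs, by simp [pvFlat]⟩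
        have hshift := find_shift pref l0 (pvFlat rest) hp hl hshape hnp
        rw [hflat]
        by_cases hz : PySem.Chars.find (pvFlat rest) ('\n' :: pref) = -1
        · have hnone : pvLoopA pref entry rest = none := by
            have := ih hrest
            simp only [pvCore, hz] at this
            cases hq : pvLoopA pref entry rest with
            | none => rfl
            | some r => rw [hq] at this; simp at this
          have : PySem.Chars.find ('\n' :: (l0 ++ pvFlat rest)) ('\n' :: pref) = -1 := by
            rw [show ('\n' :: (l0 ++ pvFlat rest)) = '\n' :: l0 ++ pvFlat rest by simp] at *
            rw [hshift, if_pos hz]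
          simp [pvCore, this, pvLoopA, hs, hnone]
        · have hge : (0:Int) ≤ PySem.Chars.find (pvFlat rest) ('\n' :: pref) := by
            rcases find_nonneg_go ('\n' :: pref) (by simp) (pvFlat rest) 0 with h1 | h1
            · exact absurd h1 hz
            · simpa [PySem.Chars.find] using h1
          set f' := PySem.Chars.find (pvFlat rest) ('\n' :: pref) with hf'
          have hfind : PySem.Chars.find ('\n' :: (l0 ++ pvFlat rest)) ('\n' :: pref) =
              (l0.length + 1 : Int) + f' := by
            rw [show ('\n' :: (l0 ++ pvFlat rest)) = '\n' :: l0 ++ pvFlat rest by simp]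
            rw [hshift, if_neg hz]
          have htoNat : ((l0.length + 1 : Int) + f').toNat = l0.length + 1 + f'.toNat := by omega
          have htake : List.take (((l0.length + 1 : Int) + f').toNat) ('\n' :: (l0 ++ pvFlat rest)) =
              '\n' :: (l0 ++ List.take f'.toNat (pvFlat rest)) := by
            rw [htoNat, show l0.length + 1 + f'.toNat = (l0.length + f'.toNat) + 1 by omega,
                List.take_succ_cons, List.take_length_add_append]
          have hdrop : List.drop (((l0.length + 1 : Int) + f').toNat + ('\n' :: pref).length) ('\n' :: (l0 ++ pvFlat rest)) =
              List.drop (f'.toNat + ('\n' :: pref).length) (pvFlat rest) := by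
            rw [htoNat, show l0.length + 1 + f'.toNat + ('\n' :: pref).length =
                  (l0.length + (f'.toNat + ('\n' :: pref).length)) + 1 by omega,
                List.drop_succ_cons, List.drop_length_add_append]
          have hIH := ih hrest
          simp only [pvCore] at hIH
          rw [if_neg hz] at hIH
          simp only [pvCore, hfind]
          rw [if_neg (by omega), htake, hdrop]
          have hloop : pvLoopA pref entry (l0 :: rest) =
              match pvLoopA pref entry rest with
              | none => none
              | some r => some (l0 :: r) := by
            simp [pvLoopA, hs]
          rw [hloop]
          cases hq : pvLoopA pref entry rest with
          | none => rw [hq] at hIH; simp at hIH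
          | some r =>
              rw [hq] at hIH
              simp only [Option.map_some, Option.some.injEq] at hIH ⊢
              rw [← hf'] at hIH
              rw [show pvFlat (l0 :: r) = '\n' :: (l0 ++ pvFlat r) by simp [pvFlat], ← hIH]
              simp

theorem pvLoopA_some_ne_nil (pref entry : List Char) (lines r : List (List Char))
    (h : pvLoopA pref entry lines = some r) : r ≠ [] := by
  induction lines generalizing r with
  | nil => simp [pvLoopA] at h
  | cons l ls ih =>
      by_cases hs : PySem.Chars.startswith l pref
      · simp [pvLoopA, hs] at h; simp [← h]
      · simp only [pvLoopA, hs, Bool.false_eq_true, if_false] at h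
        cases hq : pvLoopA pref entry ls with
        | none => simp [hq] at h
        | some r' => simp [hq] at h; simp [← h]

-- B's port, rewritten through pvCore
theorem alt_eq_core (content var_name var_value : String) :
    update_env_var_alt content var_name var_value =
      String.ofList (match pvCore (var_name.toList ++ ['=']) (var_name.toList ++ '=' :: var_value.toList) ('\n' :: content.toList) with
                     | none => content.toList ++ '\n' :: (var_name.toList ++ '=' :: var_value.toList)
                     | some r => r.drop 1) := by
  unfold update_env_var_alt pvCore pvPartition
  simp only []
  by_cases h1 : PySem.Chars.find ('\n' :: content.toList) ('\n' :: (var_name.toList ++ ['='])) = -1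
  · rw [if_pos h1, if_pos h1]
    simp
  · rw [if_neg h1, if_neg h1]
    simp only []
    rw [if_neg (by simp)]
    by_cases h2 : PySem.Chars.find (List.drop ((PySem.Chars.find ('\n' :: content.toList) ('\n' :: (var_name.toList ++ ['=']))).toNat + ('\n' :: (var_name.toList ++ ['='])).length) ('\n' :: content.toList)) ['\n'] = -1
    · rw [if_pos h2, if_pos h2]
      rw [PySem.List.slice_from _ (by omega : (0:Int) ≤ (1:Int))]
      simp
    · rw [if_neg h2, if_neg h2]
      rw [PySem.List.slice_from _ (by omega : (0:Int) ≤ (1:Int))]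
      simp

theorem join_append_entry (cs e : List Char) :
    PySem.Chars.join ['\n'] (pvSplit cs ++ [e]) = cs ++ '\n' :: e := by
  have hne : pvSplit cs ++ [e] ≠ [] := by simp
  have h1 := pvFlat_join _ hne
  rw [show pvFlat (pvSplit cs ++ [e]) = pvFlat (pvSplit cs) ++ '\n' :: e by simp [pvFlat],
      pvFlat_pvSplit] at h1
  simp only [List.cons_append, List.cons.injEq, true_and] at h1
  exact h1

theorem pvLoopA_none (pref entry : List Char) (lines : List (List Char))
    (h : ∀ l ∈ lines, ¬ PySem.Chars.startswith l pref = true) :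
    pvLoopA pref entry lines = none := by
  induction lines with
  | nil => rfl
  | cons l ls ih =>
      rw [pvLoopA, if_neg (h l List.mem_cons_self),
          ih (fun l hl => h l (List.mem_cons_of_mem _ hl))]

-- ===== VERDICT (by name: the statement is the Claim_ definition above) =====
theorem update_env_var_spec : Claim_equal_update_env_var := by
  intro content var_name var_value _ hpre
  unfold Spec_update_env_var update_env_var
  rw [alt_eq_core]
  by_cases hnl : '\n' ∈ var_name.toList
  · -- excluded unless the pattern never occurs: then both sides append
    have hni : ¬ PySem.Chars.isIn ('\n' :: var_name.toList ++ ['=']) ('\n' :: content.toList) = true := by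
      rcases hpre with h | h
      · exact absurd hnl h
      · exact h
    have hfind : PySem.Chars.find ('\n' :: content.toList) ('\n' :: (var_name.toList ++ ['='])) = -1 := by
      rw [PySem.Chars.find_eq_neg_one_iff]
      intro hinf
      exact hni ((PySem.Chars.isIn_iff_infix _ _).mpr hinf)
    have hloop : pvLoopA (var_name.toList ++ ['=']) (var_name.toList ++ '=' :: var_value.toList)
        (pvSplit content.toList) = none := by
      apply pvLoopA_none
      intro l hl hsw
      exact pvSplit_no_newline content.toList l hl
        ((List.isPrefixOf_iff_prefix.mp hsw).subset (by simp [hnl]))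
    rw [splitOn_eq_pvSplit]
    dsimp only
    rw [hloop]
    simp only [pvCore, hfind, if_pos]
    exact congrArg String.ofList (join_append_entry _ _)
  · have hp : '\n' ∉ var_name.toList ++ ['='] := by
      simp only [List.mem_append, List.mem_singleton]
      rintro (h | h)
      · exact hnl h
      · exact absurd h (by decide)
    have hsplit := splitOn_eq_pvSplit content.toList
    have hcore := pvCore_flat (var_name.toList ++ ['=']) (var_name.toList ++ '=' :: var_value.toList)
      hp (pvSplit content.toList) (pvSplit_no_newline content.toList)
    rw [pvFlat_pvSplit] at hcore
    rw [hsplit, hcore]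
    dsimp only
    cases hq : pvLoopA (var_name.toList ++ ['=']) (var_name.toList ++ '=' :: var_value.toList) (pvSplit content.toList) with
    | none =>
        simp only [Option.map_none]
        exact congrArg String.ofList (join_append_entry _ _)
    | some r =>
        simp only [Option.map_some]
        congr 1
        have hne := pvLoopA_some_ne_nil _ _ _ _ hq
        have h1 := pvFlat_join r hne
        rw [← h1, List.drop_succ_cons, List.drop_zero]
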